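-- pv_equiv track=rewrite | github.com/RohanK6/Hangman | TextHangman.py | wordToDash
-- ===== SOURCE A (Python) =====
-- def wordToDash(secretPhrase):
-- 	n = 0
-- 	dashes = ""
-- 	letters = "abcdefghijklmnopqrstuvwxyzABCDEFGHIJKLMNOPQRSTUVWXYZ"
-- 	while n < int(len(secretPhrase)):
-- 		if secretPhrase[n] not in letters != True:
-- 			dashes = dashes + (secretPhrase[n])
-- 		else:
-- 			dashes = dashes + "_"
-- 		n = n + 1
-- 	return dashes
-- ===== SOURCE B (Python) =====
-- def wordToDash(secretPhrase):
--     # Staged passes: replace every occurrence of each of the 52 ASCII letters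
--     # by '_', one whole-string replace per letter; no per-character test remains.
--     for letter in "abcdefghijklmnopqrstuvwxyzABCDEFGHIJKLMNOPQRSTUVWXYZ":
--         secretPhrase = secretPhrase.replace(letter, "_")
--     return secretPhrase
-- ===== Notes on version B (the rewrite author's own statement) =====
-- stated objective: faster
-- what changed: Replaces A's single index-driven per-character loop (52-char membership scan and quadratic string concatenation per character) by 52 staged whole-string str.replace passes, one per letter, with no per-character Python loop or conditional at all.
import Mathlib
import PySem

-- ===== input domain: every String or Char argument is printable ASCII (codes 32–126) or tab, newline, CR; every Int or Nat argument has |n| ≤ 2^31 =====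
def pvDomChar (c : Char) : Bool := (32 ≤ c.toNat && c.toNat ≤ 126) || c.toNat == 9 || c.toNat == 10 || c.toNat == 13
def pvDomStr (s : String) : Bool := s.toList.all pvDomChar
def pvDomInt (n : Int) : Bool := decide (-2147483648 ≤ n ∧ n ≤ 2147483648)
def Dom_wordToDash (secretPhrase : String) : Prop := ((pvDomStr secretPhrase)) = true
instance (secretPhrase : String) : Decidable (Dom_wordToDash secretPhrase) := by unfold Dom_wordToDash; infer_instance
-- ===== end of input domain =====

-- B replaces A's index-driven while loop (per-character membership scan + concatenation)
-- by 52 staged whole-string str.replace passes, one per letter; same return value.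

-- ===== PORT A =====
-- the 52-letter string A calls `letters`
def pvLetters : List Char := "abcdefghijklmnopqrstuvwxyzABCDEFGHIJKLMNOPQRSTUVWXYZ".toList

-- the while loop of A: n counts up, dashes accumulates; `secretPhrase[n]` is in range
-- because the loop guard is exactly n < len(secretPhrase); the chained comparison
-- `x not in letters != True` evaluates to `x not in letters` (letters != True is always True).
def wordToDashGo (s : List Char) (n : Nat) (dashes : List Char) : List Char :=
  if n < s.length then
    let c := PySem.List.pyGetD s (n : Int) ' '
    wordToDashGo s (n + 1)
      (if !(PySem.Chars.isIn [c] pvLetters) then dashes ++ [c] else dashes ++ ['_'])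
  else dashes
termination_by s.length - n

def wordToDash (secretPhrase : String) : String :=
  String.ofList (wordToDashGo secretPhrase.toList 0 [])

-- ===== PORT B =====
-- `for letter in letters: secretPhrase = secretPhrase.replace(letter, "_")`: a fold of
-- whole-string replace passes over the 52 letters, then the result is returned.
def wordToDash_alt (secretPhrase : String) : String :=
  pvLetters.foldl (fun acc letter => PySem.Str.replace acc (String.ofList [letter]) "_") secretPhrase

-- ===== PRECONDITION & SPEC =====
def Spec_wordToDash (secretPhrase : String) (out : String) : Prop := out = wordToDash_alt secretPhrase
instance (secretPhrase : String) (out : String) : Decidable (Spec_wordToDash secretPhrase out) := by unfold Spec_wordToDash; infer_instance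

-- ===== CLAIM (what is proved, stated in full; the proofs are below) =====
def Claim_equal_wordToDash : Prop := ∀ (secretPhrase : String), Dom_wordToDash secretPhrase → Spec_wordToDash secretPhrase (wordToDash secretPhrase)

-- ===== LEMMAS AND PROOFS =====

-- per-character picture of one single-char replace pass (the go loop)
theorem pv_replace_go_single (ch : Char) (l acc : List Char) (fuel : Nat) (h : l.length ≤ fuel) :
    PySem.Chars.replace.go [ch] ['_'] fuel l acc
      = acc.reverse ++ l.map (fun c => if c = ch then '_' else c) := by
  induction l generalizing fuel acc with
  | nil => rw [PySem.Chars.replace.go.eq_def]; cases fuel <;> simp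
  | cons c t ih =>
      cases fuel with
      | zero => simp at h
      | succ fuel =>
          rw [PySem.Chars.replace.go.eq_def]
          simp only [List.isPrefixOf, List.map_cons]
          rcases eq_or_ne c ch with rfl | hne
          · rw [if_pos (by simp)]
            simp only [List.length_cons, List.length_nil, List.drop_succ_cons, List.drop_zero]
            rw [ih _ _ (by simpa using h)]
            simp
          · rw [if_neg (by simp [Ne.symm hne]), ih _ _ (by simpa using h)]
            simp [hne]

theorem pv_replace_single (ch : Char) (l : List Char) :
    PySem.Chars.replace l [ch] ['_'] = l.map (fun c => if c = ch then '_' else c) := by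
  rw [PySem.Chars.replace]
  simp [pv_replace_go_single ch l [] l.length le_rfl]

-- the fold of 52 replace passes acts pointwise: it is a single map of the folded per-char function
theorem pv_fold_replace (ls : List Char) (s : String) :
    ls.foldl (fun acc letter => PySem.Str.replace acc (String.ofList [letter]) "_") s
      = String.ofList (s.toList.map (fun c => ls.foldl (fun x letter => if x = letter then '_' else x) c)) := by
  induction ls generalizing s with
  | nil => simp
  | cons h t ih =>
      have hrepl : PySem.Str.replace s (String.ofList [h]) "_"
          = String.ofList (s.toList.map (fun c => if c = h then '_' else c)) := by
        apply String.toList_injective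
        rw [PySem.Str.toList_replace]
        simpa using pv_replace_single h s.toList
      rw [List.foldl_cons, hrepl, ih]
      simp [List.foldl_cons, Function.comp_def]

-- '_' stays fixed under every further pass
theorem pv_fold_underscore (ls : List Char) (h : '_' ∉ ls) :
    ls.foldl (fun x letter => if x = letter then '_' else x) '_' = '_' := by
  induction ls with
  | nil => rfl
  | cons a t ih =>
      simp only [List.mem_cons, not_or] at h
      simp [List.foldl_cons, h.1, ih h.2]

-- per character, the chain of single-letter passes is the membership test
theorem pv_fold_char (ls : List Char) (c : Char) (h : '_' ∉ ls) :
    ls.foldl (fun x letter => if x = letter then '_' else x) c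
      = if c ∈ ls then '_' else c := by
  induction ls with
  | nil => rfl
  | cons a t ih =>
      simp only [List.mem_cons, not_or] at h
      rcases eq_or_ne c a with rfl | hne
      · simp [List.foldl_cons, pv_fold_underscore t h.2]
      · simp [List.foldl_cons, hne, ih h.2]

theorem pv_isIn_singleton (c : Char) (l : List Char) :
    PySem.Chars.isIn [c] l = decide (c ∈ l) := by
  rw [Bool.eq_iff_iff, PySem.Chars.isIn_iff_infix]
  simp [List.singleton_infix_iff]

-- A's loop is the same map
theorem pv_go_eq (s : List Char) (n : Nat) (dashes : List Char) :
    wordToDashGo s n dashes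
      = dashes ++ (s.drop n).map (fun c => if c ∈ pvLetters then '_' else c) := by
  fun_induction wordToDashGo s n dashes with
  | case1 n dashes h c ih =>
      have hg : c = s[n]'h := by
        simp only [c]
        rw [PySem.List.pyGetD_eq_getElem s ' ' (by omega) (by exact_mod_cast h)]
        simp
      simp only [dite_eq_ite] at ih
      rw [ih, List.drop_eq_getElem_cons h, List.map_cons, pv_isIn_singleton, hg]
      by_cases hin : s[n]'h ∈ pvLetters <;> simp [hin]
  | case2 n dashes h =>
      rw [List.drop_eq_nil_of_le (by omega), List.map_nil, List.append_nil]

-- ===== VERDICT (by name: the statement is the Claim_ definition above) =====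
theorem pv_underscore_notin : '_' ∉ pvLetters := by decide

theorem wordToDash_spec : Claim_equal_wordToDash := by
  intro s _
  unfold Spec_wordToDash wordToDash wordToDash_alt
  rw [pv_go_eq, pv_fold_replace]
  refine congrArg String.ofList ?_
  rw [List.drop_zero, List.nil_append]
  exact List.map_congr_left fun c _ => (pv_fold_char pvLetters c pv_underscore_notin).symm
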